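-- pv_equiv track=rewrite | github.com/jisu8110/Baekjoon-zip | 프로그래머스/0/120853. 컨트롤 제트/컨트롤 제트.py | solution
-- ===== SOURCE A (Python) =====
-- def solution(s):
--
-- #     array = s.split(" ")
-- #     handle = ""
-- #     answer = 0
--
-- #     for i in array:
-- #         if i != 'Z':
-- #             handle = i
-- #             answer += int(handle)
-- #         else:
-- #             answer -= int(handle)
--
--     stack = []
--     array = s.split()
--
--     for i in array:
--         if i != 'Z':
--             stack.append(int(i))
--         else:
--             stack.pop()
--
--     return sum(stack)
-- ===== SOURCE B (Python) =====
-- def solution(s):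
--     # Reverse scan with a pending-cancellation counter instead of a stack.
--     total = 0
--     pending = 0
--     for t in reversed(s.split()):
--         if t == 'Z':
--             pending += 1
--         elif pending > 0:
--             pending -= 1
--         else:
--             total += int(t)
--     return total
-- ===== Notes on version B (the rewrite author's own statement) =====
-- stated objective: alternative
-- what changed: Replaces the stack (push numbers, pop on 'Z', sum at the end) by a single right-to-left pass keeping only an integer pending-cancellation counter and a running total, O(1) extra space instead of a stack.
-- outside the precondition, e.g. on solution('Z'): A raises IndexError, B returns 0
import Mathlib
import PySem

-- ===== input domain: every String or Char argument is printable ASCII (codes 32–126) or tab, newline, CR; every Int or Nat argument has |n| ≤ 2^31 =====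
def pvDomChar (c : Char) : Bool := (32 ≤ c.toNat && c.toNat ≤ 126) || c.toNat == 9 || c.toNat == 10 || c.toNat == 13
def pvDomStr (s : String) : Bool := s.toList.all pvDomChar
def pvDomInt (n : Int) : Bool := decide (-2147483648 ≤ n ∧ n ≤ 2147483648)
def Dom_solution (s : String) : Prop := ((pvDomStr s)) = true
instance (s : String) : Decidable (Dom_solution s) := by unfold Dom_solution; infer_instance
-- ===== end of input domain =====

-- B replaces A's stack by a reverse scan with a pending-cancellation counter (same result, O(1) extra space).


-- ===== PORT A =====
-- the for-loop over the tokens; stack kept top-first (push = cons, pop = drop head;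
-- only the sum of the stack is used, which is order-independent); none = the loop raises
def solRun : List String → List Int → Option (List Int)
  | [], st => some st
  | t :: ts, st =>
    if t ≠ "Z" then
      match PySem.Int.ofStr? t with      -- int(i); none = ValueError
      | some v => solRun ts (v :: st)
      | none => none
    else
      match st with
      | [] => none                        -- stack.pop() on empty = IndexError
      | _ :: st' => solRun ts st'

def solution (s : String) : Int :=
  match solRun (PySem.Str.split₀ s) [] with
  | some st => st.sum
  | none => 0                             -- unreachable under Pre_solution

-- ===== PORT B =====
-- acc = (pending, total)
def altStep (acc : Int × Int) (t : String) : Int × Int :=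
  if t = "Z" then (acc.1 + 1, acc.2)
  else if acc.1 > 0 then (acc.1 - 1, acc.2)
  else (acc.1, acc.2 + (PySem.Int.ofStr? t).getD 0)   -- int(t); Pre_ excludes ValueError

def solution_alt (s : String) : Int :=
  ((PySem.Str.split₀ s).reverse.foldl altStep (0, 0)).2

-- ===== PRECONDITION & SPEC =====
-- exactly the inputs on which A returns: every non-'Z' token is a valid int literal
-- (else int() raises ValueError) and no prefix holds more 'Z's than numbers
-- (else stack.pop() raises IndexError)
def Pre_solution (s : String) : Prop :=
  (∀ t ∈ PySem.Str.split₀ s, t ≠ "Z" → (PySem.Int.ofStr? t).isSome = true) ∧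
  (∀ n ≤ (PySem.Str.split₀ s).length, 2 * ((PySem.Str.split₀ s).take n).count "Z" ≤ n)
instance (s : String) : Decidable (Pre_solution s) := by unfold Pre_solution; infer_instance

def pvWitness_solution : String := "1 2 Z 3"

def Spec_solution (s : String) (out : Int) : Prop := out = solution_alt s
instance (s : String) (out : Int) : Decidable (Spec_solution s out) := by unfold Spec_solution; infer_instance

-- ===== CLAIM (what is proved, stated in full; the proofs are below) =====
def Claim_equal_solution : Prop := ∀ (s : String), Dom_solution s → Pre_solution s → Spec_solution s (solution s)

-- ===== LEMMAS AND PROOFS =====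

-- B's reverse foldl as a foldr over the token list
def brun (ts : List String) : Int × Int := List.foldr (fun t acc => altStep acc t) (0, 0) ts

theorem brun_nonneg (ts : List String) : 0 ≤ (brun ts).1 := by
  induction ts with
  | nil => simp [brun]
  | cons t ts ih =>
    have hb : brun (t :: ts) = altStep (brun ts) t := rfl
    rw [hb]; unfold altStep; split_ifs <;> simp <;> omega

-- invariant: A's stack sum = B's total plus what survives of the initial stack
theorem solRun_sum (ts : List String) : ∀ (st res : List Int),
    solRun ts st = some res →
    res.sum = (brun ts).2 + (st.drop (brun ts).1.toNat).sum := by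
  induction ts with
  | nil => intro st res h; simp [solRun] at h; simp [brun, ← h]
  | cons t ts ih =>
    intro st res h
    have hk := brun_nonneg ts
    have hb : brun (t :: ts) = altStep (brun ts) t := rfl
    simp only [solRun] at h
    by_cases ht : t = "Z"
    · simp [ht] at h
      match st with
      | [] => exact absurd h (by simp)
      | x :: st' =>
        simp at h
        have hih := ih st' res h
        have hstep : altStep (brun ts) t = ((brun ts).1 + 1, (brun ts).2) := by
          simp [altStep, ht]
        rw [hb, hstep]
        have h1 : ((brun ts).1 + 1).toNat = (brun ts).1.toNat + 1 := by omega
        simpa [h1] using hih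
    · simp [ht] at h
      match hp : PySem.Int.ofStr? t with
      | none => rw [hp] at h; exact absurd h (by simp)
      | some v =>
        rw [hp] at h; simp at h
        have hih := ih (v :: st) res h
        rw [hb]
        by_cases hkpos : (brun ts).1 > 0
        · have hstep : altStep (brun ts) t = ((brun ts).1 - 1, (brun ts).2) := by
            simp [altStep, ht, hkpos]
          rw [hstep]
          have h1 : (brun ts).1.toNat = ((brun ts).1 - 1).toNat + 1 := by omega
          rw [h1] at hih
          simpa using hih
        · have hk0 : (brun ts).1 = 0 := by omega
          have hstep : altStep (brun ts) t = ((brun ts).1, (brun ts).2 + v) := by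
            simp [altStep, ht, hkpos, hp]
          rw [hstep]
          rw [hk0] at hih ⊢
          simp at hih ⊢
          omega

-- under the prefix-balance condition the loop never underflows
theorem solRun_isSome (ts : List String) : ∀ (st : List Int),
    (∀ t ∈ ts, t ≠ "Z" → (PySem.Int.ofStr? t).isSome = true) →
    (∀ n ≤ ts.length, 2 * (ts.take n).count "Z" ≤ n + st.length) →
    (solRun ts st).isSome = true := by
  induction ts with
  | nil => intro st _ _; simp [solRun]
  | cons t ts ih =>
    intro st hparse hbal
    simp only [solRun]
    by_cases ht : t = "Z"
    · have h1 := hbal 1 (by simp)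
      simp [ht] at h1
      match st with
      | [] => simp at h1
      | x :: st' =>
        simp [ht]
        refine ih st' (fun u hu => hparse u (List.mem_cons_of_mem _ hu)) ?_
        intro n hn
        have := hbal (n + 1) (by simpa using Nat.succ_le_succ hn)
        simp [ht] at this
        simp; omega
    · simp [ht]
      have hv := hparse t (List.mem_cons_self) ht
      match hp : PySem.Int.ofStr? t with
      | none => rw [hp] at hv; simp at hv
      | some v =>
        refine ih (v :: st) (fun u hu => hparse u (List.mem_cons_of_mem _ hu)) ?_
        intro n hn
        have := hbal (n + 1) (by simpa using Nat.succ_le_succ hn)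
        simp [ht] at this
        simp; omega

-- ===== VERDICT (by name: the statement is the Claim_ definition above) =====
theorem solution_spec : Claim_equal_solution := by
  intro s _ hpre
  unfold Spec_solution solution solution_alt
  obtain ⟨hparse, hbal⟩ := hpre
  have hsome := solRun_isSome (PySem.Str.split₀ s) [] hparse
    (by intro n hn; simpa using hbal n hn)
  match hres : solRun (PySem.Str.split₀ s) [] with
  | none => rw [hres] at hsome; simp at hsome
  | some res =>
    have := solRun_sum (PySem.Str.split₀ s) [] res hres
    simp at this
    rw [List.foldl_reverse]
    simpa [brun] using this
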